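-- pv_equiv track=rewrite | github.com/radian462/Game-Bot | Game/Werewolf/manager.py | _decide_execute_target
-- ===== SOURCE A (Python) =====
-- from collections import Counter
--
-- def _decide_execute_target(results: list[int | None]) -> int | None:
--     """
--     処刑投票の結果から、実際に処刑する対象を決定する。
--     過半数がスキップした場合は処刑を行わない。
--     また、最も票を得たプレイヤーが複数いた場合も処刑しない。
--
--     Parameters
--     ----------
--     results: list[int]
--         投票結果のリスト。各プレイヤーのIDが格納されている。
--     Returns
--     -------
--     int | None
--         処刑対象のプレイヤーID。決定しなかった場合はNone。
--     """
--     counter = Counter(results)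
--
--     if not counter:
--         execute_target = None
--     elif counter.get(None, 0) * 2 >= len(results):
--         execute_target = None
--     else:
--         most_common = counter.most_common()
--         max_count = most_common[0][1]
--         result_candidates = [k for k, v in most_common if v == max_count]
--         execute_target = (
--             result_candidates[0] if len(result_candidates) == 1 else None
--         )
--
--     return execute_target
-- ===== SOURCE B (Python) =====
-- def _decide_execute_target(results):
--     n = len(results)
--     if n == 0:
--         return None
--     none_count = sum(1 for r in results if r is None)
--     if none_count * 2 >= n:
--         return None
--     votes = sorted(r for r in results if r is not None)
--     m = len(votes)
--     best_key, best_len, unique = None, none_count, True  # None's tally competes too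
--     i = 0
--     while i < m:
--         j = i + 1
--         while j < m and votes[j] == votes[i]:
--             j += 1
--         run = j - i
--         if run > best_len:
--             best_key, best_len, unique = votes[i], run, True
--         elif run == best_len:
--             unique = False
--         i = j
--     return best_key if unique else None
-- ===== Notes on version B (the rewrite author's own statement) =====
-- stated objective: alternative
-- what changed: B drops Counter and most_common entirely: it counts the None skips in one pass, sorts the non-None votes, and scans the sorted list run by run, keeping the best run length (seeded with the skip count so None competes) and a uniqueness flag; no dictionary and no per-key candidate list are ever built.
import Mathlib
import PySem

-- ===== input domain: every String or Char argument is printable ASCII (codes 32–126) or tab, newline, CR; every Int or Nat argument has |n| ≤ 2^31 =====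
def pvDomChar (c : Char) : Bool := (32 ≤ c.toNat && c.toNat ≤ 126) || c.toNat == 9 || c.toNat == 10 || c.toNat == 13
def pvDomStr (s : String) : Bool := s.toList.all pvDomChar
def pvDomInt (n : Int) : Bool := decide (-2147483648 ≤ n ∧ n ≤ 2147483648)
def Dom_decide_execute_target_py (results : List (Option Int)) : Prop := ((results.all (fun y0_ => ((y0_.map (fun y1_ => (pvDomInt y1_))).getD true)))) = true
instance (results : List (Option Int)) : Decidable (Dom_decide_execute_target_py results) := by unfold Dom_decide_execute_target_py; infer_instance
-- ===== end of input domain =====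

-- B drops the Counter/most_common machinery: it counts skips, sorts the non-None votes and
-- scans the sorted list run by run for a unique longest run (alternative decomposition).

-- ===== PORT A =====
def decide_execute_target_py (results : List (Option Int)) : Option Int :=
  let counter := PySem.Dict.counter results
  if counter.items = [] then none            -- `if not counter`
  else if counter.getD none 0 * 2 ≥ (results.length : Int) then none
  else
    let most_common := PySem.List.sorted counter.items (fun kv => kv.2) true  -- Counter.most_common(): stable sort by count, descending
    let max_count := (most_common.headD (none, 0)).2  -- most_common[0][1]; default unreachable: counter is nonempty here
    let result_candidates := (most_common.filter (fun kv => kv.2 == max_count)).map (fun kv => kv.1)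
    if result_candidates.length == 1 then result_candidates.headD none else none  -- result_candidates[0]; index 0 in range by the length guard

-- ===== PORT B =====
-- the outer `while i < m` loop over runs; the inner `while votes[j] == votes[i]` advance is
-- the takeWhile/dropWhile split of the remaining list, `run = j - i` its length
def pvRunScan (votes : List Int) (best : Option Int) (bestLen : Int) (unique : Bool) : Option Int :=
  match votes with
  | [] => if unique then best else none      -- `return best_key if unique else None`
  | v :: rest =>
    let run : Int := 1 + (rest.takeWhile (fun x => x == v)).length
    let rest' := rest.dropWhile (fun x => x == v)
    if bestLen < run then pvRunScan rest' (some v) run true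
    else if run == bestLen then pvRunScan rest' best bestLen false
    else pvRunScan rest' best bestLen unique
termination_by votes.length
decreasing_by all_goals exact Nat.lt_succ_of_le (List.length_dropWhile_le _ _)

def decide_execute_target_py_alt (results : List (Option Int)) : Option Int :=
  let n : Int := results.length
  if results.length == 0 then none           -- `if n == 0`
  else
    let none_count : Int := results.countP (fun r => r.isNone)  -- sum(1 for r in results if r is None)
    if none_count * 2 ≥ n then none
    else
      let votes := PySem.List.sorted (results.filterMap id) (fun x => x) false  -- sorted(r for r in results if r is not None)
      pvRunScan votes none none_count true   -- best_key, best_len, unique = None, none_count, True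

-- ===== PRECONDITION & SPEC =====
def Spec_decide_execute_target_py (results : List (Option Int)) (out : Option Int) : Prop := out = decide_execute_target_py_alt results
instance (results : List (Option Int)) (out : Option Int) : Decidable (Spec_decide_execute_target_py results out) := by unfold Spec_decide_execute_target_py; infer_instance

-- ===== CLAIM (what is proved, stated in full; the proofs are below) =====
def Claim_equal_decide_execute_target_py : Prop := ∀ (results : List (Option Int)), Dom_decide_execute_target_py results → Spec_decide_execute_target_py results (decide_execute_target_py results)

-- ===== LEMMAS AND PROOFS =====

def pvPick (lb : List (Option Int)) : Option Int :=
  match lb with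
  | [w] => w
  | _ => none

def pvSel (ps : List (Option Int × Int)) (best : Option Int) (bestLen : Int) (unique : Bool) : Option Int :=
  match ps with
  | [] => if unique then best else none
  | (k, v) :: rest =>
    if bestLen < v then pvSel rest k v true
    else if v == bestLen then pvSel rest best bestLen false
    else pvSel rest best bestLen unique

def pvGroups (S : List Int) : List (Option Int × Int) :=
  match S with
  | [] => []
  | v :: rest => (some v, 1 + ((rest.takeWhile (fun x => x == v)).length : Int)) :: pvGroups (rest.dropWhile (fun x => x == v))
termination_by S.length
decreasing_by exact Nat.lt_succ_of_le (List.length_dropWhile_le _ _)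

def pvMaxC (l : Int) (ps : List (Option Int × Int)) : Int := ps.foldl (fun m kv => max m kv.2) l

theorem count_filterMap_id (l : List (Option Int)) (k : Int) :
    (l.filterMap id).count k = l.count (some k) := by
  induction l with
  | nil => rfl
  | cons a t ih =>
    cases a <;> simp [List.count_cons] <;> simpa using ih

theorem countP_isNone_eq_count (l : List (Option Int)) :
    l.countP (fun r => r.isNone) = l.count none := by
  rw [List.count]
  congr 1
  funext r
  cases r <;> simp

theorem foldl_max_eq (l : List Int) (a c : Int) (ha : a ≤ c) (hall : ∀ y ∈ l, y ≤ c)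
    (hmem : c = a ∨ c ∈ l) : l.foldl max a = c := by
  induction l generalizing a with
  | nil =>
    rcases hmem with h | h
    · simpa using h.symm
    · simp at h
  | cons x t ih =>
    have hx : x ≤ c := hall x List.mem_cons_self
    have hall' : ∀ y ∈ t, y ≤ c := fun y hy => hall y (List.mem_cons_of_mem _ hy)
    rcases hmem with h | h
    · exact ih (max a x) (by omega) hall' (Or.inl (by omega))
    · rw [List.mem_cons] at h
      rcases h with h | h
      · exact ih (max a x) (by omega) hall' (Or.inl (by omega))
      · exact ih (max a x) (by omega) hall' (Or.inr h)

theorem run_eq_sel (votes : List Int) (b : Option Int) (l : Int) (u : Bool) :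
    pvRunScan votes b l u = pvSel (pvGroups votes) b l u := by
  fun_induction pvRunScan votes b l u <;>
    (simp only [pvGroups, pvSel]; split_ifs <;> simp_all) <;>
    first | rfl | omega

theorem le_pvMaxC (a : Int) (qs : List (Option Int × Int)) : a ≤ pvMaxC a qs := by
  induction qs generalizing a with
  | nil => simp [pvMaxC]
  | cons q t ihq =>
    have := ihq (max a q.2)
    simp only [pvMaxC, List.foldl_cons] at *
    omega

theorem pvSel_spec (ps : List (Option Int × Int)) (b : Option Int) (l : Int) (u : Bool) :
    pvSel ps b l u =
      (if l = pvMaxC l ps then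
        (if (ps.filter (fun kv => kv.2 == pvMaxC l ps)).map Prod.fst = [] then (if u then b else none) else none)
       else pvPick ((ps.filter (fun kv => kv.2 == pvMaxC l ps)).map Prod.fst)) := by
  induction ps generalizing b l u with
  | nil => simp [pvSel, pvMaxC]
  | cons p rest ih =>
    obtain ⟨k, v⟩ := p
    have hstep : pvMaxC l ((k, v) :: rest) = pvMaxC (max l v) rest := rfl
    by_cases h1 : l < v
    · -- new strict best
      have hvM := le_pvMaxC v rest
      rw [pvSel, if_pos h1, ih k v true, hstep, max_eq_right h1.le, List.filter_cons]
      clear ih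
      rw [if_neg (show ¬ l = pvMaxC v rest by omega)]
      by_cases h2 : v = pvMaxC v rest
      · have hb : (v == pvMaxC v rest) = true := by simpa using h2
        rw [if_pos h2, if_pos hb, List.map_cons]
        rcases hq : (rest.filter (fun kv => kv.2 == pvMaxC v rest)).map Prod.fst with _ | ⟨q, qs⟩ <;>
          rw [hq] <;> simp [pvPick]
      · have hb : (v == pvMaxC v rest) = false := by simp [h2]
        rw [if_neg h2]
        simp [hb]
    · by_cases h2 : v = l
      · -- tie with current best
        rw [pvSel, if_neg h1, if_pos (by simp [h2]), ih b l false, hstep, h2, max_self,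
          List.filter_cons]
        clear ih
        by_cases h3 : l = pvMaxC l rest
        · have hb : (l == pvMaxC l rest) = true := by simpa using h3
          rw [if_pos h3, if_pos h3, if_pos hb, List.map_cons]
          rcases hq : (rest.filter (fun kv => kv.2 == pvMaxC l rest)).map Prod.fst with _ | ⟨q, qs⟩ <;>
            rw [hq] <;> simp
        · have hb : (l == pvMaxC l rest) = false := by simp [h3]
          rw [if_neg h3, if_neg h3]
          simp [hb]
      · -- strictly worse
        have h4 : v < l := by omega
        have hlM := le_pvMaxC l rest
        rw [pvSel, if_neg h1, if_neg (by simp [h2]), ih b l u, hstep, max_eq_left h4.le,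
          List.filter_cons]
        clear ih
        have hb : (v == pvMaxC l rest) = false := by simp; omega
        rw [if_neg (show ¬ ((v == pvMaxC l rest) = true) by simp [hb])]

theorem dropWhile_gt (v : Int) (rest : List Int) (h : (v :: rest).Pairwise (· ≤ ·)) :
    ∀ y ∈ rest.dropWhile (fun x => x == v), v < y := by
  rcases hd : rest.dropWhile (fun x => x == v) with _ | ⟨h0, t0⟩
  · simp
  · have hsub : (h0 :: t0).Sublist rest := hd ▸ List.dropWhile_sublist _
    have hmem : h0 ∈ rest := hsub.mem List.mem_cons_self
    have hle : v ≤ h0 := (List.pairwise_cons.mp h).1 h0 hmem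
    have hne : ¬ ((fun x => x == v) h0 = true) := by
      have := List.head?_dropWhile_not (fun x => x == v) rest
      rw [hd] at this
      simpa using this
    have hlt : v < h0 := by simp at hne; omega
    have hp : (h0 :: t0).Pairwise (· ≤ ·) := List.Pairwise.sublist hsub (List.pairwise_cons.mp h).2
    intro y hy
    rcases List.mem_cons.mp hy with rfl | hy'
    · exact hlt
    · have := (List.pairwise_cons.mp hp).1 y hy'
      omega

theorem count_head_run (v : Int) (rest : List Int) (h : (v :: rest).Pairwise (· ≤ ·)) :
    (v :: rest).count v = 1 + (rest.takeWhile (fun x => x == v)).length := by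
  have hsplit : rest.takeWhile (fun x => x == v) ++ rest.dropWhile (fun x => x == v) = rest :=
    List.takeWhile_append_dropWhile
  have htw : ∀ x ∈ rest.takeWhile (fun x => x == v), x = v := by
    intro x hx
    have := List.mem_takeWhile_imp hx
    simpa using this
  have h1 : (rest.takeWhile (fun x => x == v)).count v = (rest.takeWhile (fun x => x == v)).length :=
    List.count_eq_length.mpr (fun x hx => by simp [htw x hx])
  have h2 : (rest.dropWhile (fun x => x == v)).count v = 0 :=
    List.count_eq_zero.mpr (fun hc => by have := dropWhile_gt v rest h v hc; omega)
  calc (v :: rest).count v = rest.count v + 1 := List.count_cons_self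
    _ = ((rest.takeWhile (fun x => x == v)) ++ (rest.dropWhile (fun x => x == v))).count v + 1 := by rw [hsplit]
    _ = 1 + (rest.takeWhile (fun x => x == v)).length := by
        rw [List.count_append, h1, h2]; omega

theorem count_tail_run (v : Int) (rest : List Int) (h : (v :: rest).Pairwise (· ≤ ·))
    (k : Int) (hk : k ∈ rest.dropWhile (fun x => x == v)) :
    (v :: rest).count k = (rest.dropWhile (fun x => x == v)).count k := by
  have hkv : v < k := dropWhile_gt v rest h k hk
  have hsplit : rest.takeWhile (fun x => x == v) ++ rest.dropWhile (fun x => x == v) = rest :=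
    List.takeWhile_append_dropWhile
  have htw : (rest.takeWhile (fun x => x == v)).count k = 0 :=
    List.count_eq_zero.mpr (fun hc => by
      have := List.mem_takeWhile_imp hc
      simp at this
      omega)
  calc (v :: rest).count k = rest.count k := by
        simp [show ¬ v = k by omega]
    _ = (rest.takeWhile (fun x => x == v) ++ rest.dropWhile (fun x => x == v)).count k := by
        conv_lhs => rw [← hsplit]
    _ = _ := by rw [List.count_append, htw]; omega

theorem mem_run_iff (v : Int) (rest : List Int) (h : (v :: rest).Pairwise (· ≤ ·)) (k : Int) :
    k ∈ v :: rest ↔ k = v ∨ k ∈ rest.dropWhile (fun x => x == v) := by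
  constructor
  · intro hmem
    rcases List.mem_cons.mp hmem with rfl | hmem'
    · exact Or.inl rfl
    · rw [← List.takeWhile_append_dropWhile (p := fun x => x == v) (l := rest)] at hmem'
      rcases List.mem_append.mp hmem' with htw | hdw
      · exact Or.inl (by simpa using List.mem_takeWhile_imp htw)
      · exact Or.inr hdw
  · intro hmem
    rcases hmem with rfl | hmem'
    · exact List.mem_cons_self
    · exact List.mem_cons_of_mem _ ((List.dropWhile_sublist _).mem hmem')

theorem mem_pvGroups : ∀ (S : List Int), S.Pairwise (· ≤ ·) → ∀ x : Option Int × Int,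
    (x ∈ pvGroups S ↔ ∃ k, k ∈ S ∧ x = (some k, (S.count k : Int))) := by
  intro S
  induction S using pvGroups.induct with
  | case1 => simp [pvGroups]
  | case2 v rest ih =>
    intro h x
    have hdw : (rest.dropWhile (fun x => x == v)).Pairwise (· ≤ ·) :=
      List.Pairwise.sublist (List.dropWhile_sublist _) (List.pairwise_cons.mp h).2
    rw [pvGroups, List.mem_cons, ih hdw x]
    constructor
    · rintro (rfl | ⟨k, hk, rfl⟩)
      · exact ⟨v, List.mem_cons_self, by rw [count_head_run v rest h]; push_cast; rfl⟩
      · exact ⟨k, (mem_run_iff v rest h k).mpr (Or.inr hk), by rw [count_tail_run v rest h k hk]⟩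
    · rintro ⟨k, hk, rfl⟩
      rcases (mem_run_iff v rest h k).mp hk with rfl | hk'
      · exact Or.inl (by rw [count_head_run _ _ h]; push_cast; rfl)
      · exact Or.inr ⟨k, hk', by rw [count_tail_run v rest h k hk']⟩

theorem pvGroups_keys_nodup : ∀ (S : List Int), S.Pairwise (· ≤ ·) →
    ((pvGroups S).map Prod.fst).Nodup := by
  intro S
  induction S using pvGroups.induct with
  | case1 => simp [pvGroups]
  | case2 v rest ih =>
    intro h
    have hdw : (rest.dropWhile (fun x => x == v)).Pairwise (· ≤ ·) :=
      List.Pairwise.sublist (List.dropWhile_sublist _) (List.pairwise_cons.mp h).2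
    rw [pvGroups, List.map_cons]
    refine List.nodup_cons.mpr ⟨?_, ih hdw⟩
    intro hmem
    rcases List.mem_map.mp hmem with ⟨⟨k0, c0⟩, hk0, hfst⟩
    rcases (mem_pvGroups _ hdw _).mp hk0 with ⟨k, hk, hkeq⟩
    have hkv : v < k := dropWhile_gt v rest h k hk
    rw [hkeq] at hfst
    simp at hfst
    omega

-- head count of the descending sort is the max of the values
theorem head_sorted_rev_eq_max (items : List (Option Int × Int)) (k : Option Int) (c : Int) (t : List (Option Int × Int))
    (h : PySem.List.sorted items (fun kv => kv.2) true = (k, c) :: t) :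
    PySem.List.max? (items.map (fun kv => kv.2)) (fun v => v) = some c := by
  have hne : items ≠ [] := by
    intro h0
    rw [h0] at h
    simp [PySem.List.sorted] at h
  rcases hm : PySem.List.max? (items.map (fun kv => kv.2)) (fun v => v) with _ | m
  · rw [PySem.List.max?_eq_none_iff] at hm
    simp only [List.map_eq_nil_iff] at hm
    exact absurd hm hne
  · have hmem : m ∈ items.map (fun kv => kv.2) := PySem.List.max?_mem hm
    have hkc : (k, c) ∈ items := by
      have hmem2 : (k, c) ∈ PySem.List.sorted items (fun kv => kv.2) true := by
        rw [h]; exact List.mem_cons_self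
      exact (PySem.List.mem_sorted _ _ _ _).mp hmem2
    have hcm : c ≤ m := PySem.List.max?_isMax hm c (List.mem_map.mpr ⟨(k, c), hkc, rfl⟩)
    have hmc : m ≤ c := by
      rcases List.mem_map.mp hmem with ⟨kv, hkv, hkv2⟩
      have hle := PySem.List.key_head_sorted_rev_ge _ _ h kv hkv
      simp only at hle
      omega
    rw [hm, Int.le_antisymm hmc hcm]

-- A's "if exactly one candidate, its head" of any rearrangement of lb equals pvPick lb
theorem pvCandCase (la lb : List (Option Int)) (h : la.Perm lb) :
    (if la.length == 1 then la.headD none else none) = pvPick lb := by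
  rcases lb with _ | ⟨w, _ | ⟨w2, ws⟩⟩
  · rw [h.eq_nil]
    simp [pvPick]
  · rw [List.perm_singleton.mp h]
    simp [pvPick]
  · have hl := h.length_eq
    simp only [List.length_cons] at hl
    have hcond : (la.length == 1) = false := by
      simp only [beq_eq_false_iff_ne, ne_eq]
      omega
    simp [pvPick, hcond]

theorem main_equiv (results : List (Option Int)) :
    decide_execute_target_py results = decide_execute_target_py_alt results := by
  by_cases hnil : results = []
  · subst hnil; rfl
  unfold decide_execute_target_py decide_execute_target_py_alt
  have hA1 : ¬ ((PySem.Dict.counter results).items = []) := by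
    rw [PySem.Dict.items_counter]
    simp only [List.map_eq_nil_iff]
    intro h0
    rcases results with _ | ⟨r0, rs⟩
    · exact hnil rfl
    · have hr : r0 ∈ PySem.Set.ofList (r0 :: rs) := (PySem.Set.mem_ofList _ _).mpr List.mem_cons_self
      rw [h0] at hr
      simp at hr
  have hB1 : ¬ ((results.length == 0) = true) := by
    simp only [beq_iff_eq, List.length_eq_zero_iff]
    exact hnil
  rw [if_neg hA1, if_neg hB1]
  have hgetD : (PySem.Dict.counter results).getD none 0 = (results.count none : Int) :=
    PySem.Dict.getD_counter _ _
  have hnc : ((results.countP (fun r => r.isNone) : Nat) : Int) = ((results.count none : Nat) : Int) := by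
    exact_mod_cast countP_isNone_eq_count results
  rw [hgetD, hnc]
  by_cases h2 : ((results.count none : Nat) : Int) * 2 ≥ (results.length : Int)
  · rw [if_pos h2, if_pos h2]
  rw [if_neg h2, if_neg h2]
  -- main branch
  set nc : Int := ((results.count none : Nat) : Int) with hncdef
  set votes := PySem.List.sorted (results.filterMap id) (fun x => x) false with hv
  have hsv : votes.Pairwise (· ≤ ·) := by
    simpa using PySem.List.sorted_pairwise (results.filterMap id) (fun x => x)
  have hvperm : votes.Perm (results.filterMap id) := PySem.List.sorted_perm _ _ _
  have hvcount : ∀ j : Int, votes.count j = results.count (some j) := fun j => by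
    rw [hvperm.count_eq, count_filterMap_id]
  have hvmem : ∀ j : Int, j ∈ votes ↔ some j ∈ results := fun j => by
    rw [hvperm.mem_iff]; simp
  set G := pvGroups votes with hG
  have hGmem : ∀ x : Option Int × Int,
      x ∈ G ↔ ∃ j : Int, some j ∈ results ∧ x = (some j, (results.count (some j) : Int)) := by
    intro x
    rw [hG, mem_pvGroups votes hsv x]
    constructor
    · rintro ⟨j, hj, rfl⟩
      exact ⟨j, (hvmem j).mp hj, by rw [hvcount j]⟩
    · rintro ⟨j, hj, rfl⟩
      exact ⟨j, (hvmem j).mpr hj, by rw [hvcount j]⟩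
  set Q := (if 0 < results.count none then ((none : Option Int), nc) :: G else G) with hQ
  have hQmem : ∀ a : Option Int × Int,
      a ∈ Q ↔ ∃ k : Option Int, k ∈ results ∧ a = (k, (results.count k : Int)) := by
    intro a
    rw [hQ]
    split_ifs with hpos
    · constructor
      · intro ha
        rcases List.mem_cons.mp ha with rfl | hmemG
        · exact ⟨none, List.count_pos_iff.mp hpos, rfl⟩
        · rcases (hGmem a).mp hmemG with ⟨j, hj, rfl⟩
          exact ⟨some j, hj, rfl⟩
      · rintro ⟨k, hk, rfl⟩
        rcases k with _ | j
        · exact List.mem_cons.mpr (Or.inl rfl)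
        · exact List.mem_cons.mpr (Or.inr ((hGmem _).mpr ⟨j, hk, rfl⟩))
    · rw [hGmem a]
      constructor
      · rintro ⟨j, hj, rfl⟩
        exact ⟨some j, hj, rfl⟩
      · rintro ⟨k, hk, rfl⟩
        rcases k with _ | j
        · exact absurd (List.count_pos_iff.mpr hk) hpos
        · exact ⟨j, hk, rfl⟩
  have hndItems : (PySem.Dict.counter results).items.Nodup := by
    rw [PySem.Dict.items_counter]
    exact (PySem.Set.nodup_ofList results).map
      (fun a b hab => congrArg Prod.fst hab)
  have hGkeys : (G.map Prod.fst).Nodup := pvGroups_keys_nodup votes hsv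
  have hndQ : Q.Nodup := by
    rw [hQ]
    split_ifs with hpos
    · refine List.Nodup.of_map Prod.fst ?_
      rw [List.map_cons]
      refine List.nodup_cons.mpr ⟨?_, hGkeys⟩
      intro hmem
      rcases List.mem_map.mp hmem with ⟨x, hx, hfst⟩
      rcases (hGmem x).mp hx with ⟨j, hj, rfl⟩
      simp at hfst
    · exact List.Nodup.of_map Prod.fst hGkeys
  have hitems : (PySem.Dict.counter results).items.Perm Q := by
    refine (List.perm_ext_iff_of_nodup hndItems hndQ).mpr ?_
    intro a
    rw [hQmem a, PySem.Dict.items_counter, List.mem_map]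
    constructor
    · rintro ⟨k, hk, rfl⟩
      exact ⟨k, (PySem.Set.mem_ofList _ _).mp hk, rfl⟩
    · rintro ⟨k, hk, rfl⟩
      exact ⟨k, (PySem.Set.mem_ofList _ _).mpr hk, rfl⟩
  rcases hs : PySem.List.sorted (PySem.Dict.counter results).items (fun kv => kv.2) true with _ | ⟨⟨k, c⟩, t⟩
  · exact absurd ((PySem.List.sorted_eq_nil_iff _ _ _).mp hs) hA1
  have hmax := head_sorted_rev_eq_max _ k c t hs
  have hallc : ∀ y ∈ (PySem.Dict.counter results).items.map (fun kv => kv.2), y ≤ c := by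
    intro y hy
    exact PySem.List.max?_isMax hmax y hy
  have hcmem : c ∈ (PySem.Dict.counter results).items.map (fun kv => kv.2) :=
    PySem.List.max?_mem hmax
  have hsndQ : ∀ a ∈ Q, a.2 ≤ c := by
    intro a ha
    exact hallc a.2 (List.mem_map.mpr ⟨a, hitems.mem_iff.mpr ha, rfl⟩)
  have hcpos : 1 ≤ c := by
    rcases List.mem_map.mp hcmem with ⟨a, ha, rfl⟩
    rcases (hQmem a).mp (hitems.mem_iff.mp ha) with ⟨kk, hkk, rfl⟩
    have := List.count_pos_iff.mpr hkk
    simp only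
    omega
  have hncle : nc ≤ c := by
    by_cases hpos : 0 < results.count none
    · have : ((none : Option Int), nc) ∈ Q := by rw [hQ, if_pos hpos]; exact List.mem_cons_self
      exact hsndQ _ this
    · have : nc = 0 := by rw [hncdef]; omega
      omega
  have hMc : pvMaxC nc G = c := by
    have hfold : pvMaxC nc G = (G.map Prod.snd).foldl max nc := by
      rw [pvMaxC, List.foldl_map]
    rw [hfold]
    refine foldl_max_eq _ _ _ hncle ?_ ?_
    · intro y hy
      rcases List.mem_map.mp hy with ⟨a, ha, rfl⟩
      refine hsndQ a ?_
      rw [hQ]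
      split_ifs
      · exact List.mem_cons_of_mem _ ha
      · exact ha
    · rcases List.mem_map.mp hcmem with ⟨a, ha, hsnd⟩
      have haQ : a ∈ Q := hitems.mem_iff.mp ha
      rw [hQ] at haQ
      by_cases hpos : 0 < results.count none
      · rw [if_pos hpos] at haQ
        rcases List.mem_cons.mp haQ with rfl | haG
        · exact Or.inl hsnd.symm
        · exact Or.inr (List.mem_map.mpr ⟨a, haG, hsnd⟩)
      · rw [if_neg hpos] at haQ
        exact Or.inr (List.mem_map.mpr ⟨a, haQ, hsnd⟩)
  -- reduce A to pvPick of Q's candidates and B to the pvSel normal form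
  simp only [List.headD_cons]
  have hperm : ((((k, c) :: t).filter (fun kv => kv.2 == c)).map (fun kv => kv.1)).Perm
      ((Q.filter (fun kv => kv.2 == c)).map Prod.fst) := by
    have hp0 : ((k, c) :: t).Perm Q := by
      rw [← hs]
      exact (PySem.List.sorted_perm _ _ _).trans hitems
    exact (hp0.filter _).map _
  rw [pvCandCase _ _ hperm, run_eq_sel, pvSel_spec, hMc]
  set CB := (G.filter (fun kv => kv.2 == c)).map Prod.fst with hCB
  by_cases hEq : nc = c
  · have hpos : 0 < results.count none := by rw [hncdef] at hEq; omega
    have hfQ : (Q.filter (fun kv => kv.2 == c)).map Prod.fst = none :: CB := by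
      rw [hQ, if_pos hpos, List.filter_cons]
      simp only [show ((none : Option Int), nc).2 == c by simpa using hEq, if_pos, List.map_cons]
      rw [hCB]
    rw [hfQ, if_pos hEq]
    rcases CB with _ | ⟨q, qs⟩ <;> simp [pvPick]
  · have hfQ : (Q.filter (fun kv => kv.2 == c)).map Prod.fst = CB := by
      rw [hQ]
      split_ifs with hpos
      · rw [List.filter_cons]
        simp [show (((none : Option Int), nc).2 == c) = false by simpa using hEq, hCB]
      · simp [hCB]
    rw [hfQ, if_neg hEq]

-- ===== VERDICT (by name: the statement is the Claim_ definition above) =====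
theorem decide_execute_target_py_spec : Claim_equal_decide_execute_target_py := by
  intro results _
  exact main_equiv results
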